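-- pv_equiv track=rewrite | github.com/jangqh/interview | jianzhioffer/04_replace_blank.py | replaceSpace1
-- ===== SOURCE A (Python) =====
-- def replaceSpace1(s):
--     """使用新的字符串进行替换
--     """
--     if type(s) != str:
--         return
--     tmpstr = ""
--     for c in s:
--         if c == ' ':
--             tmpstr += "%20"
--         else:
--             tmpstr += c
--     return tmpstr
-- ===== SOURCE B (Python) =====
-- def replaceSpace1(s):
--     """Split on single spaces and join with '%20' (idiomatic library form)."""
--     if type(s) != str:
--         return
--     return "%20".join(s.split(' '))
-- ===== Notes on version B (the rewrite author's own statement) =====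
-- stated objective: idiomatic
-- what changed: Replaces the character-by-character accumulator loop with a split-on-space plus '%20'-join over whole segments.
import Mathlib
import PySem

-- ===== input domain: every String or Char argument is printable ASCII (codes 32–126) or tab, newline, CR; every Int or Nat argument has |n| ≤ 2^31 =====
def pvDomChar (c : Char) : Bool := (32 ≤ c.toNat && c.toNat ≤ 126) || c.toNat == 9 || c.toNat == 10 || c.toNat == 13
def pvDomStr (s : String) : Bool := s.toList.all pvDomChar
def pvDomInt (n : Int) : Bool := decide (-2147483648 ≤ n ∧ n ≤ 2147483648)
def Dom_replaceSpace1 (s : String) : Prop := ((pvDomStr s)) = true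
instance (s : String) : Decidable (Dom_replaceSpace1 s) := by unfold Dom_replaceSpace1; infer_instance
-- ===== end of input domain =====

-- B replaces A's character-by-character accumulator loop with split-on-' ' + '%20'.join (idiomatic).
-- ===== PORT A =====
-- tmpstr accumulated as a List Char (Lean's own String append is opaque); wrapped back with String.ofList
def replaceSpace1 (s : String) : String :=
  String.ofList (s.toList.foldl
    (fun tmpstr c => if c == ' ' then tmpstr ++ ['%', '2', '0'] else tmpstr ++ [c]) [])

-- ===== PORT B =====
def replaceSpace1_alt (s : String) : String :=
  match PySem.Str.split? s " " with
  | some parts => PySem.Str.join "%20" parts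
  | none => ""   -- unreachable: the separator " " is nonempty

-- ===== PRECONDITION & SPEC =====
def Spec_replaceSpace1 (s : String) (out : String) : Prop := out = replaceSpace1_alt s
instance (s : String) (out : String) : Decidable (Spec_replaceSpace1 s out) := by unfold Spec_replaceSpace1; infer_instance

-- ===== CLAIM (what is proved, stated in full; the proofs are below) =====
def Claim_equal_replaceSpace1 : Prop := ∀ (s : String), Dom_replaceSpace1 s → Spec_replaceSpace1 s (replaceSpace1 s)

-- ===== LEMMAS AND PROOFS =====

-- ===== VERDICT (by name: the statement is the Claim_ definition above) =====
-- sp is the clean recursion computing splitOn cs [' ']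
def sp : List Char → List (List Char)
  | [] => [[]]
  | c :: rest => if c = ' ' then [] :: sp rest else (sp rest).modifyHead (c :: ·)

theorem sp_ne_nil (l : List Char) : sp l ≠ [] := by
  cases l with
  | nil => simp [sp]
  | cons c rest =>
    simp only [sp]
    split
    · simp
    · cases h : sp rest with
      | nil => exact absurd h (sp_ne_nil rest)
      | cons x xs => simp [List.modifyHead]

theorem go_eq_sp (fuel : Nat) (l cur : List Char) (acc : List (List Char))
    (h : l.length < fuel) :
    PySem.Chars.splitOn.go [' '] fuel l cur acc
      = acc.reverse ++ (sp l).modifyHead (cur.reverse ++ ·) := by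
  induction fuel generalizing l cur acc with
  | zero => omega
  | succ fuel ih =>
    cases l with
    | nil => simp [PySem.Chars.splitOn.go, sp, List.modifyHead]
    | cons c rest =>
      by_cases hc : c = ' '
      · subst hc
        have : PySem.Chars.splitOn.go [' '] (fuel + 1) (' ' :: rest) cur acc
            = PySem.Chars.splitOn.go [' '] fuel rest [] (cur.reverse :: acc) := by
          simp [PySem.Chars.splitOn.go, List.isPrefixOf]
        rw [this, ih rest [] (cur.reverse :: acc) (by simpa using Nat.lt_of_succ_lt_succ h)]
        cases hsp : sp rest with
        | nil => exact absurd hsp (sp_ne_nil rest)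
        | cons x xs => simp [sp, List.modifyHead, hsp]
      · have : PySem.Chars.splitOn.go [' '] (fuel + 1) (c :: rest) cur acc
            = PySem.Chars.splitOn.go [' '] fuel rest (c :: cur) acc := by
          simp only [PySem.Chars.splitOn.go, List.isPrefixOf]
          rw [if_neg (by simp [Ne.symm hc])]
        rw [this, ih rest (c :: cur) acc (by simpa using Nat.lt_of_succ_lt_succ h)]
        simp only [sp, if_neg hc]
        cases hsp : sp rest with
        | nil => exact absurd hsp (sp_ne_nil rest)
        | cons x xs => simp [List.modifyHead]

theorem splitOn_space (cs : List Char) : PySem.Chars.splitOn cs [' '] = sp cs := by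
  unfold PySem.Chars.splitOn
  rw [go_eq_sp _ _ _ _ (by omega)]
  cases h : sp cs with
  | nil => exact absurd h (sp_ne_nil cs)
  | cons x xs => simp [List.modifyHead]

theorem intercalate_cons₂ (sep x y : List Char) (ys : List (List Char)) :
    sep.intercalate (x :: y :: ys) = x ++ sep ++ sep.intercalate (y :: ys) := by
  simp [List.intercalate, List.intersperse]

theorem intercalate_sp (cs : List Char) :
    List.intercalate ['%', '2', '0'] (sp cs)
      = cs.flatMap (fun c => if c == ' ' then ['%', '2', '0'] else [c]) := by
  induction cs with
  | nil => simp [sp, List.intercalate]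
  | cons c rest ih =>
    by_cases hc : c = ' '
    · subst hc
      cases hsp : sp rest with
      | nil => exact absurd hsp (sp_ne_nil rest)
      | cons x xs =>
        rw [hsp] at ih
        simp [sp, hsp, intercalate_cons₂, ih]
    · cases hsp : sp rest with
      | nil => exact absurd hsp (sp_ne_nil rest)
      | cons x xs =>
        simp only [sp, if_neg hc, List.flatMap_cons]
        rw [hsp] at ih ⊢
        cases xs with
        | nil => simp_all [List.intercalate, List.modifyHead]
        | cons y ys =>
          simp only [List.modifyHead]
          rw [← ih, intercalate_cons₂, intercalate_cons₂]
          simp [hc]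

theorem replaceSpace1_spec : Claim_equal_replaceSpace1 := by
  intro s _
  unfold Spec_replaceSpace1 replaceSpace1 replaceSpace1_alt
  simp only [PySem.Str.split?, PySem.Chars.split?, PySem.Str.join, PySem.Chars.join,
    show (" ".toList) = [' '] from rfl, show ("%20".toList) = ['%', '2', '0'] from rfl,
    List.isEmpty_cons]
  have hfold : ∀ (l acc : List Char),
      l.foldl (fun tmpstr c => if c == ' ' then tmpstr ++ ['%', '2', '0'] else tmpstr ++ [c]) acc
        = acc ++ l.flatMap (fun c => if c == ' ' then ['%', '2', '0'] else [c]) := by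
    intro l acc
    rw [show (fun tmpstr c => if c == ' ' then tmpstr ++ ['%', '2', '0'] else tmpstr ++ [c])
        = (fun tmpstr c => tmpstr ++ (if c == ' ' then ['%', '2', '0'] else [c])) from by
      funext t c; split <;> rfl]
    exact PySem.List.foldl_append_eq_flatMap _ _ _
  rw [hfold]
  simp only [List.nil_append]
  congr 1
  rw [splitOn_space, ← intercalate_sp]
  congr 1
  simp [Function.comp_def, String.toList_ofList]
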